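-- pv_equiv track=rewrite | github.com/EarlyRiser42/ALLim_- | Programmers/2단계/42586.py | solution
-- ===== SOURCE A (Python) =====
-- import math
--
-- def solution(progresses, speeds):
--     answer = []
--     times = []
--     for i in range(len(progresses)):
--         left = math.ceil((100-progresses[i])/speeds[i])
--         times.append(left)
--
--     while times:
--         cnt = 1
--         time = times.pop(0)
--         while times and times[0] <= time:
--             del times[0]
--             cnt += 1
--         answer.append(cnt)
--     return answer
-- ===== SOURCE B (Python) =====
-- import math
-- from itertools import accumulate
--
--
-- def solution(progresses, speeds):
--     # remaining days per task
--     times = [math.ceil((100 - p) / s) for p, s in zip(progresses, speeds)]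
--     # prefix-maximum table: prefmax[i] = max(times[0..i])
--     prefmax = list(accumulate(times, max))
--     # one counting pass: a new group opens exactly where the running max strictly increases
--     answer = []
--     prev = None
--     for m in prefmax:
--         if prev is None or m > prev:
--             answer.append(1)
--         else:
--             answer[-1] += 1
--         prev = m
--     return answer
-- ===== Notes on version B (the rewrite author's own statement) =====
-- stated objective: faster
-- what changed: Replaces A's destructive nested while loops (pop(0)/del times[0], each shifting the whole list) by a prefix-maximum table plus one counting pass that opens a new group exactly where the running maximum strictly increases.
import Mathlib
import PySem

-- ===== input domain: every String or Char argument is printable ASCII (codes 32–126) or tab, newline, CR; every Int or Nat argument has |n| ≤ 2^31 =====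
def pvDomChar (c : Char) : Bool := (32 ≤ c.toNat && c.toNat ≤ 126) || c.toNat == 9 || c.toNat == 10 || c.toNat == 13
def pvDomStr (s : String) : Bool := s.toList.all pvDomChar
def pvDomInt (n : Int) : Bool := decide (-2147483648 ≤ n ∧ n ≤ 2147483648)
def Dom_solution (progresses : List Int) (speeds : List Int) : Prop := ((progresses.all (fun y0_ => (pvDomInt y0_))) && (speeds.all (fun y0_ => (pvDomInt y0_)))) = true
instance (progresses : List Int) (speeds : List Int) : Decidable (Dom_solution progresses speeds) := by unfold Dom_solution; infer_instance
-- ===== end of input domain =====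

-- B replaces A's quadratic pop(0)/del-based grouping by a linear prefix-maximum table and
-- one counting pass (objective: faster).
-- math.ceil((100-p)/s) is ported as exact ceiling division -((-(100-p)) // s); on Dom
-- (|n| ≤ 2^31) the float division error is below the distance to the next integer, so the
-- float ceil equals the exact ceil.

-- ===== PORT A =====
-- A raises IndexError / ZeroDivisionError outside Pre_solution; the port uses getD 0 there
-- (those inputs are excluded by Pre_solution).
def solutionTimes (progresses : List Int) (speeds : List Int) : List Int :=
  (PySem.List.pyRange 0 progresses.length 1).foldl
    (fun times i =>
      let left := -(PySem.Int.floordiv (-(100 - PySem.List.pyGetD progresses i 0))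
                      (PySem.List.pyGetD speeds i 0))
      times ++ [left]) []

-- inner while: consume leading elements ≤ time, counting them
def solutionInner (time : Int) : List Int → Int × List Int
  | [] => (0, [])
  | t :: rest =>
    if t ≤ time then
      let r := solutionInner time rest
      (r.1 + 1, r.2)
    else (0, t :: rest)

theorem solutionInner_len_le (time : Int) (l : List Int) :
    (solutionInner time l).2.length ≤ l.length := by
  induction l with
  | nil => simp [solutionInner]
  | cons t rest ih =>
    simp only [solutionInner]
    split
    · exact le_trans ih (Nat.le_succ _)
    · simp

-- outer while over times, accumulating answer
def solutionLoop (times : List Int) (answer : List Int) : List Int :=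
  match times with
  | [] => answer
  | t :: rest =>
    let r := solutionInner t rest
    solutionLoop r.2 (answer ++ [1 + r.1])
  termination_by times.length
  decreasing_by
    simpa using Nat.lt_succ_of_le (solutionInner_len_le t rest)

def solution (progresses : List Int) (speeds : List Int) : List Int :=
  solutionLoop (solutionTimes progresses speeds) []

-- ===== PORT B =====
def solutionAltTimes (progresses : List Int) (speeds : List Int) : List Int :=
  (progresses.zip speeds).map
    (fun ps => -(PySem.Int.floordiv (-(100 - ps.1)) ps.2))

-- itertools.accumulate(times, max)
def accRun (m : Int) : List Int → List Int
  | [] => []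
  | x :: xs => (max m x) :: accRun (max m x) xs

def accMax : List Int → List Int
  | [] => []
  | t :: rest => t :: accRun t rest

-- answer[-1] += 1
def bumpLast : List Int → List Int
  | [] => []
  | [x] => [x + 1]
  | x :: rest => x :: bumpLast rest

-- the counting pass: new group where the running max strictly increases
def countStep (st : List Int × Option Int) (m : Int) : List Int × Option Int :=
  match st.2 with
  | none => (st.1 ++ [1], some m)
  | some prev => if prev < m then (st.1 ++ [1], some m) else (bumpLast st.1, some m)

def countGroups (prefmax : List Int) : List Int :=
  (prefmax.foldl countStep ([], none)).1

def solution_alt (progresses : List Int) (speeds : List Int) : List Int :=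
  countGroups (accMax (solutionAltTimes progresses speeds))

-- ===== PRECONDITION & SPEC =====
-- Pre_solution is exactly where A returns: every task has a paired speed and each used speed
-- is nonzero (otherwise A raises IndexError / ZeroDivisionError).
def Pre_solution (progresses : List Int) (speeds : List Int) : Prop :=
  progresses.length ≤ speeds.length ∧
    ∀ x ∈ speeds.take progresses.length, x ≠ 0

instance (progresses : List Int) (speeds : List Int) : Decidable (Pre_solution progresses speeds) := by
  unfold Pre_solution; infer_instance

def pvWitness_solution : List Int × List Int := ([93, 30, 55], [1, 30, 5])

def Spec_solution (progresses : List Int) (speeds : List Int) (out : List Int) : Prop := out = solution_alt progresses speeds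
instance (progresses : List Int) (speeds : List Int) (out : List Int) : Decidable (Spec_solution progresses speeds out) := by unfold Spec_solution; infer_instance

-- ===== CLAIM (what is proved, stated in full; the proofs are below) =====
def Claim_equal_solution : Prop := ∀ (progresses : List Int) (speeds : List Int), Dom_solution progresses speeds → Pre_solution progresses speeds → Spec_solution progresses speeds (solution progresses speeds)

-- ===== LEMMAS AND PROOFS =====

-- common reference grouping (used only in the proofs)
def groups (l : List Int) : List Int :=
  match h : l with
  | [] => []
  | t :: rest =>
    (1 + ((rest.takeWhile (· ≤ t)).length : Int)) :: groups (rest.dropWhile (· ≤ t))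
  termination_by l.length
  decreasing_by
    simpa using Nat.lt_succ_of_le (List.length_dropWhile_le _ rest)

theorem solutionInner_eq (time : Int) (l : List Int) :
    solutionInner time l = (((l.takeWhile (· ≤ time)).length : Int), l.dropWhile (· ≤ time)) := by
  induction l with
  | nil => simp [solutionInner]
  | cons t rest ih =>
    simp only [solutionInner, List.takeWhile, List.dropWhile]
    by_cases h : t ≤ time
    · simp [h, ih]
    · simp [h]

theorem solutionLoop_eq_groups (l : List Int) (ans : List Int) :
    solutionLoop l ans = ans ++ groups l := by
  induction hn : l.length using Nat.strong_induction_on generalizing l ans with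
  | _ n ih =>
    match l with
    | [] => simp [solutionLoop, groups]
    | t :: rest =>
      rw [solutionLoop, solutionInner_eq]
      have hd : (List.dropWhile (fun x => decide (x ≤ t)) rest).length < n := by
        subst hn
        simpa using Nat.lt_succ_of_le (List.length_dropWhile_le _ rest)
      rw [ih _ hd _ _ rfl, groups]
      simp

-- the counting fold only appends or bumps the last element, so a stable prefix splits off
theorem countFold_split (l : List Int) (a b : List Int) (p : Option Int) (hb : b ≠ []) :
    (l.foldl countStep (a ++ b, p)).1 = a ++ (l.foldl countStep (b, p)).1 := by
  induction l generalizing a b p with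
  | nil => simp
  | cons m rest ih =>
    simp only [List.foldl]
    cases p with
    | none =>
      simp only [countStep]
      rw [List.append_assoc]
      exact ih a (b ++ [1]) _ (by simp)
    | some prev =>
      simp only [countStep]
      by_cases h : prev < m
      · simp only [if_pos h]
        rw [List.append_assoc]
        exact ih a (b ++ [1]) _ (by simp)
      · simp only [if_neg h]
        have hbl : bumpLast (a ++ b) = a ++ bumpLast b := by
          induction a with
          | nil => rfl
          | cons x xs ihx =>
            cases hxs : xs ++ b with
            | nil => cases xs <;> simp_all
            | cons y ys =>
              simp only [List.cons_append, bumpLast, hxs]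
              rw [← hxs, ihx]
        have hbn : bumpLast b ≠ [] := by
          cases b with
          | nil => exact absurd rfl hb
          | cons x xs => cases xs <;> simp [bumpLast]
        rw [hbl]
        exact ih a (bumpLast b) _ hbn

theorem bumpLast_singleton (k : Int) : bumpLast [k] = [k + 1] := rfl

-- core invariant of the counting pass over a running-max stream
theorem countFold_accRun (rest : List Int) (k t : Int) :
    ((accRun t rest).foldl countStep ([k], some t)).1 =
      (k + ((rest.takeWhile (· ≤ t)).length : Int)) :: groups (rest.dropWhile (· ≤ t)) := by
  induction hn : rest.length using Nat.strong_induction_on generalizing rest k t with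
  | _ n ih =>
    match rest with
    | [] => simp [accRun, groups]
    | x :: xs =>
      by_cases h : x ≤ t
      · have hmax : max t x = t := by omega
        have hstep : countStep ([k], some t) t = ([k + 1], some t) := by
          simp [countStep, bumpLast_singleton]
        simp only [accRun, hmax, List.foldl, hstep]
        rw [ih xs.length (by simp only [List.length_cons] at hn; omega) xs (k + 1) t rfl]
        have htw : List.takeWhile (fun y => decide (y ≤ t)) (x :: xs)
            = x :: List.takeWhile (fun y => decide (y ≤ t)) xs := by
          simp [List.takeWhile, h]
        have hdw : List.dropWhile (fun y => decide (y ≤ t)) (x :: xs)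
            = List.dropWhile (fun y => decide (y ≤ t)) xs := by
          simp [List.dropWhile, h]
        rw [htw, hdw]
        congr 1
        simp only [List.length_cons]
        push_cast
        ring
      · have hlt : t < x := by omega
        have hmax : max t x = x := by omega
        simp only [accRun, hmax, List.foldl, countStep, if_pos hlt]
        rw [countFold_split (accRun x xs) [k] [1] (some x) (by simp),
          ih xs.length (by simp only [List.length_cons] at hn; omega) xs 1 x rfl]
        have htw : List.takeWhile (fun y => decide (y ≤ t)) (x :: xs) = [] := by
          simp [List.takeWhile, h]
        have hdw : List.dropWhile (fun y => decide (y ≤ t)) (x :: xs) = x :: xs := by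
          simp [List.dropWhile, h]
        rw [htw, hdw, groups]
        simp

theorem countGroups_accMax (l : List Int) : countGroups (accMax l) = groups l := by
  match l with
  | [] => simp [countGroups, accMax, groups]
  | t :: rest =>
    simp only [countGroups, accMax, List.foldl, countStep, List.nil_append]
    rw [countFold_accRun rest 1 t, groups]

theorem times_eq (progresses speeds : List Int)
    (hlen : progresses.length ≤ speeds.length) :
    solutionTimes progresses speeds = solutionAltTimes progresses speeds := by
  unfold solutionTimes solutionAltTimes
  rw [PySem.List.foldl_append_singleton_eq_map]
  apply List.ext_getElem
  · simp [PySem.List.length_pyRange_one]; omega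
  · intro i h1 h2
    have hi : i < progresses.length := by
      simpa [PySem.List.length_pyRange_one] using h1
    have hi2 : i < speeds.length := lt_of_lt_of_le hi hlen
    simp [PySem.List.getElem_pyRange_one, List.getElem_zip,
      PySem.List.pyGetD_natCast, List.getD_eq_getElem?_getD,
      List.getElem?_eq_getElem hi, List.getElem?_eq_getElem hi2]

-- ===== VERDICT (by name: the statement is the Claim_ definition above) =====
theorem solution_spec : Claim_equal_solution := by
  intro progresses speeds _ hpre
  unfold Spec_solution solution solution_alt
  rw [times_eq progresses speeds hpre.1, solutionLoop_eq_groups,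
    countGroups_accMax]
  simp
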